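-- pv_equiv track=rewrite | github.com/GabrielToth/Botjacker | player.py | cards_list
-- ===== SOURCE A (Python) =====
-- def max_card_value(hand_value): #Recebe valor da mão - Retorna Carta de maior valor
--     max_card = 0
--     for next_card_value in range(1,12):
--         if hand_value + next_card_value <= 21:
--             max_card = next_card_value
--     return max_card
--
-- def card_quantity(hand_value): #Recebe valor da mão - Retorna a quantidade de cartas possível
--     if hand_value > 21:
--         return 0
--
--     max_card = max_card_value(hand_value)
--     total_cards = max_card
--     if max_card >= 10:
--         total_cards += 3
--     if max_card == 11:
--         total_cards -= 1
--     return total_cards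
--
-- def cards_list(hand_value): #Recebe valor da mão - Retorna o valor das Cartas possíveis
--     if hand_value > 21:
--         return 'BUSTED - ReMoVe Me FrOm CaRdS_lIsT'
--
--     quant_card = card_quantity(hand_value)
--
--     if quant_card < 1:
--         return 'VINTE_E_UM - ReMoVe Me FrOm CaRdS_lIsT'
--
--     frenchsuits_list = []
--
--     if quant_card <= 10:
--         for i in range(quant_card):
--             frenchsuits_list.append(i+1)
--     else:
--         for i in range(10):
--             frenchsuits_list.append(i+1)
--         if quant_card >= 11: frenchsuits_list.append('J')
--         if quant_card >= 12: frenchsuits_list.append('Q')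
--         if quant_card == 13: frenchsuits_list.append('K')
--     final_list = cards_identifier(frenchsuits_list)
--     return final_list
--
-- def cards_identifier(list): #Uso Restrito ao cards_list()
--     txt_fsuit_list = ''
--     for i in list:
--         if i == 1:
--             txt_fsuit_list += f'A'
--
--         else:
--             txt_fsuit_list += f', {i}'
--     return txt_fsuit_list
-- ===== SOURCE B (Python) =====
-- def cards_list(hand_value):
--     if hand_value > 21:
--         return 'BUSTED - ReMoVe Me FrOm CaRdS_lIsT'
--     if hand_value == 21:
--         return 'VINTE_E_UM - ReMoVe Me FrOm CaRdS_lIsT'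
--     quant = 13 if hand_value <= 11 else 21 - hand_value
--     NAMES = ['A', '2', '3', '4', '5', '6', '7', '8', '9', '10', 'J', 'Q', 'K']
--     return ', '.join(NAMES[:quant])
-- ===== Notes on version B (the rewrite author's own statement) =====
-- stated objective: simpler
-- what changed: B removes every loop of A: the 1..11 scan plus the two quantity adjustments are replaced by a closed-form integer quantity (13 if hand_value <= 11 else 21 - hand_value), and the branchy list building plus the cards_identifier formatting loop are replaced by slicing a constant name table and ', '.join.
import Mathlib
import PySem

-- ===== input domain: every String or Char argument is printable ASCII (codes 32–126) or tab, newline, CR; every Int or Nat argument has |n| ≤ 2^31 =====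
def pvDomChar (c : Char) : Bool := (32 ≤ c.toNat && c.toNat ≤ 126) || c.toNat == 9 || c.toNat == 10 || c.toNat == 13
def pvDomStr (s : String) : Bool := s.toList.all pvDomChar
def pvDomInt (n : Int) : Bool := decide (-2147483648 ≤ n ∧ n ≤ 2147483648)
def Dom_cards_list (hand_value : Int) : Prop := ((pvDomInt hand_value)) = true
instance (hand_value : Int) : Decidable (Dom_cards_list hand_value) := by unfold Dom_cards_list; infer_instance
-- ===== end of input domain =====

-- B is loop-free: a closed-form integer quantity and a constant name table joined with ', '
-- replace A's scan, adjustments, branchy list building and formatter loop (objective: simpler).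

-- ===== PORT A =====
-- Python card values are a heterogeneous list of ints and one-char strings; ported as Int ⊕ String.
def pvFmt (i : Int ⊕ String) : String :=
  match i with
  | Sum.inl n => PySem.Int.toStr n
  | Sum.inr s => s

def max_card_value (hand_value : Int) : Int :=
  (PySem.List.pyRange 1 12 1).foldl
    (fun max_card next_card_value =>
      if hand_value + next_card_value ≤ 21 then next_card_value else max_card) 0

def card_quantity (hand_value : Int) : Int :=
  if hand_value > 21 then 0
  else
    let max_card := max_card_value hand_value
    let total_cards := max_card
    let total_cards := if max_card ≥ 10 then total_cards + 3 else total_cards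
    let total_cards := if max_card = 11 then total_cards - 1 else total_cards
    total_cards

def cards_identifier (l : List (Int ⊕ String)) : String :=
  l.foldl (fun txt i => if i = Sum.inl 1 then txt ++ "A" else txt ++ ", " ++ pvFmt i) ""

def cards_list (hand_value : Int) : String :=
  if hand_value > 21 then "BUSTED - ReMoVe Me FrOm CaRdS_lIsT"
  else
    let quant_card := card_quantity hand_value
    if quant_card < 1 then "VINTE_E_UM - ReMoVe Me FrOm CaRdS_lIsT"
    else
      let frenchsuits_list :=
        if quant_card ≤ 10 then
          (PySem.List.pyRange 0 quant_card 1).map (fun i => (Sum.inl (i + 1) : Int ⊕ String))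
        else
          ((PySem.List.pyRange 0 10 1).map (fun i => (Sum.inl (i + 1) : Int ⊕ String)))
            ++ (if quant_card ≥ 11 then [Sum.inr "J"] else [])
            ++ (if quant_card ≥ 12 then [Sum.inr "Q"] else [])
            ++ (if quant_card = 13 then [Sum.inr "K"] else [])
      cards_identifier frenchsuits_list

-- ===== PORT B =====
def cards_list_alt (hand_value : Int) : String :=
  if hand_value > 21 then "BUSTED - ReMoVe Me FrOm CaRdS_lIsT"
  else if hand_value = 21 then "VINTE_E_UM - ReMoVe Me FrOm CaRdS_lIsT"
  else
    let quant : Int := if hand_value ≤ 11 then 13 else 21 - hand_value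
    let NAMES : List String := ["A","2","3","4","5","6","7","8","9","10","J","Q","K"]
    String.intercalate ", " (PySem.List.slice NAMES none (some quant))

-- ===== PRECONDITION & SPEC =====
def Spec_cards_list (hand_value : Int) (out : String) : Prop := out = cards_list_alt hand_value
instance (hand_value : Int) (out : String) : Decidable (Spec_cards_list hand_value out) := by unfold Spec_cards_list; infer_instance

-- ===== CLAIM =====
def Claim_equal_cards_list : Prop := ∀ (hand_value : Int), Dom_cards_list hand_value → Spec_cards_list hand_value (cards_list hand_value)

-- ===== LEMMAS AND PROOFS =====
set_option maxHeartbeats 2000000 in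
lemma scan_eq (hv : Int) :
    (PySem.List.pyRange 1 12 1).foldl
      (fun max_card next_card_value =>
        if hv + next_card_value ≤ 21 then next_card_value else max_card) 0
    = if hv ≤ 10 then 11 else if hv ≤ 20 then 21 - hv else 0 := by
  have hr : PySem.List.pyRange 1 12 1 = [1,2,3,4,5,6,7,8,9,10,11] := by decide
  rw [hr]
  simp only [List.foldl]
  split_ifs <;> omega

-- ===== VERDICT =====
theorem cards_list_spec : Claim_equal_cards_list := by
  intro hv _
  unfold Spec_cards_list cards_list cards_list_alt card_quantity max_card_value
  rw [scan_eq]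
  by_cases h21 : hv > 21
  · simp [h21]
  · by_cases h10 : hv ≤ 10
    · have hne : ¬ hv = 21 := by omega
      have h11 : hv ≤ 11 := by omega
      simp only [h21, if_false, h10, if_true, hne, h11]
      norm_num
      decide
    · have h1 : 11 ≤ hv := by omega
      have h2 : hv ≤ 21 := by omega
      interval_cases hv <;> decide
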